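-- pv_equiv track=rewrite | github.com/kishan-kumar-s-d-444/Project-SG | authserver/app/utils.py | validate_car_scope
-- ===== SOURCE A (Python) =====
-- def get_scope_category(scope):
--     """Get the category of a specific scope"""
--     categories = {
--         'basic_operations': ['engine_start', 'engine_stop', 'door_lock', 'door_unlock', 'trunk_access', 'horn_control', 'light_control'],
--         'climate': ['climate_control', 'temperature_set', 'ac_control', 'heater_control', 'defrost_control', 'fan_control'],
--         'vehicle_status': ['battery_status', 'fuel_status', 'tire_pressure', 'oil_status', 'diagnostic_basic', 'diagnostic_full'],
--         'location': ['location_access', 'location_history', 'geofence_set', 'route_planning', 'navigation_control'],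
--         'connectivity': ['ota_update', 'wifi_control', 'bluetooth_control', 'mobile_app_sync'],
--         'safety': ['alarm_control', 'emergency_call', 'crash_detection', 'theft_alert', 'valet_mode'],
--         'driver_assistance': ['parking_assist', 'lane_control', 'cruise_control', 'speed_limit', 'driver_assist_settings'],
--         'entertainment': ['media_control', 'audio_settings', 'display_settings', 'passenger_entertainment'],
--         'preferences': ['seat_control', 'mirror_control', 'profile_management', 'driving_mode'],
--         'maintenance': ['service_schedule', 'maintenance_history', 'repair_status', 'recall_info'],
--         'data': ['telemetry_basic', 'telemetry_advanced', 'usage_statistics', 'efficiency_metrics']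
--     }
--
--     for category, scopes in categories.items():
--         if scope in scopes:
--             return category
--     return None
--
-- def validate_car_scope(requested_scope, allowed_scopes):
--     """Enhanced validation of requested scopes against allowed scopes"""
--     if not requested_scope or not allowed_scopes:
--         return False
--
--     requested = set(requested_scope.split())
--     allowed = set(allowed_scopes.split())
--
--     # Check if all requested scopes are allowed
--     if not requested.issubset(allowed):
--         return False
--
--     # Additional validation for scope categories
--     requested_categories = {get_scope_category(scope) for scope in requested}
--     allowed_categories = {get_scope_category(scope) for scope in allowed}
--
--     return None not in requested_categories and requested_categories.issubset(allowed_categories)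
-- ===== SOURCE B (Python) =====
-- CATEGORIES = {
--     'basic_operations': ['engine_start', 'engine_stop', 'door_lock', 'door_unlock', 'trunk_access', 'horn_control', 'light_control'],
--     'climate': ['climate_control', 'temperature_set', 'ac_control', 'heater_control', 'defrost_control', 'fan_control'],
--     'vehicle_status': ['battery_status', 'fuel_status', 'tire_pressure', 'oil_status', 'diagnostic_basic', 'diagnostic_full'],
--     'location': ['location_access', 'location_history', 'geofence_set', 'route_planning', 'navigation_control'],
--     'connectivity': ['ota_update', 'wifi_control', 'bluetooth_control', 'mobile_app_sync'],
--     'safety': ['alarm_control', 'emergency_call', 'crash_detection', 'theft_alert', 'valet_mode'],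
--     'driver_assistance': ['parking_assist', 'lane_control', 'cruise_control', 'speed_limit', 'driver_assist_settings'],
--     'entertainment': ['media_control', 'audio_settings', 'display_settings', 'passenger_entertainment'],
--     'preferences': ['seat_control', 'mirror_control', 'profile_management', 'driving_mode'],
--     'maintenance': ['service_schedule', 'maintenance_history', 'repair_status', 'recall_info'],
--     'data': ['telemetry_basic', 'telemetry_advanced', 'usage_statistics', 'efficiency_metrics']
-- }
--
-- # Reverse index built once: scope -> category (the scope lists are disjoint).
-- SCOPE_TO_CATEGORY = {scope: category for category, scopes in CATEGORIES.items() for scope in scopes}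
--
--
-- def validate_car_scope(requested_scope, allowed_scopes):
--     """Enhanced validation of requested scopes against allowed scopes"""
--     if not requested_scope or not allowed_scopes:
--         return False
--     allowed = set(allowed_scopes.split())
--     # every requested scope must be allowed and be a known (categorised) scope;
--     # category containment then follows automatically from scope containment
--     return all(s in allowed and s in SCOPE_TO_CATEGORY
--                for s in requested_scope.split())
-- ===== Notes on version B (the rewrite author's own statement) =====
-- stated objective: idiomatic
-- what changed: B precomputes one reverse scope->category dict and validates in a single pass over the requested scopes (each scope: allowed and categorised), replacing A's per-scope linear scan over all category lists and the construction/subset comparison of two category sets.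
import Mathlib
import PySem

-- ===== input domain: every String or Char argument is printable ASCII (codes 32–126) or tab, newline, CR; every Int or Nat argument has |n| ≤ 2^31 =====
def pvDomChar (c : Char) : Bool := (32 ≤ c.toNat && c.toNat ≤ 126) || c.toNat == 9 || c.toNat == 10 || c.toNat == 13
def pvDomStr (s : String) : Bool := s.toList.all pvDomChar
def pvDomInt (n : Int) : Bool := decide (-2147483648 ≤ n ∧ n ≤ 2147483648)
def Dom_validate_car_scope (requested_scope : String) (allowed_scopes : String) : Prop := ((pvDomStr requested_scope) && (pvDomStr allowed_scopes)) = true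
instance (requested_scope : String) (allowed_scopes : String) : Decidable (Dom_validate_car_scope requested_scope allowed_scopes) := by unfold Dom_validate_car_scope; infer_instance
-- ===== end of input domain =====

-- B replaces A's per-scope linear scan over the category table and the category-set subset
-- test by a precomputed reverse index (scope -> category) and one pass over the requested
-- scopes (idiomatic, table-driven; same return value).


-- ===== PORT A =====
def categoriesA : List (String × List String) :=
  [("basic_operations", ["engine_start", "engine_stop", "door_lock", "door_unlock", "trunk_access", "horn_control", "light_control"]),
   ("climate", ["climate_control", "temperature_set", "ac_control", "heater_control", "defrost_control", "fan_control"]),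
   ("vehicle_status", ["battery_status", "fuel_status", "tire_pressure", "oil_status", "diagnostic_basic", "diagnostic_full"]),
   ("location", ["location_access", "location_history", "geofence_set", "route_planning", "navigation_control"]),
   ("connectivity", ["ota_update", "wifi_control", "bluetooth_control", "mobile_app_sync"]),
   ("safety", ["alarm_control", "emergency_call", "crash_detection", "theft_alert", "valet_mode"]),
   ("driver_assistance", ["parking_assist", "lane_control", "cruise_control", "speed_limit", "driver_assist_settings"]),
   ("entertainment", ["media_control", "audio_settings", "display_settings", "passenger_entertainment"]),
   ("preferences", ["seat_control", "mirror_control", "profile_management", "driving_mode"]),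
   ("maintenance", ["service_schedule", "maintenance_history", "repair_status", "recall_info"]),
   ("data", ["telemetry_basic", "telemetry_advanced", "usage_statistics", "efficiency_metrics"])]

-- 'for category, scopes in categories.items(): if scope in scopes: return category' / 'return None'
def gscLoop : List (String × List String) → String → Option String
  | [], _ => none
  | (category, scopes) :: rest, scope =>
      if scopes.contains scope then some category else gscLoop rest scope

def get_scope_category (scope : String) : Option String := gscLoop categoriesA scope

def validate_car_scope (requested_scope : String) (allowed_scopes : String) : Bool :=
  if requested_scope = "" ∨ allowed_scopes = "" then false
  else
    let requested := PySem.Set.ofList (PySem.Str.split₀ requested_scope)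
    let allowed := PySem.Set.ofList (PySem.Str.split₀ allowed_scopes)
    if !(PySem.Set.issubset requested allowed) then false
    else
      let requested_categories := PySem.Set.ofList (requested.map get_scope_category)
      let allowed_categories := PySem.Set.ofList (allowed.map get_scope_category)
      !(PySem.Set.contains requested_categories none) &&
        PySem.Set.issubset requested_categories allowed_categories

-- ===== PORT B =====
def categoriesB : List (String × List String) := categoriesA

-- SCOPE_TO_CATEGORY = {scope: category for category, scopes in CATEGORIES.items() for scope in scopes}
def scopePairs : List (String × String) :=
  categoriesB.flatMap (fun p => p.2.map (fun scope => (scope, p.1)))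

def scopeToCategory : PySem.Dict String String :=
  scopePairs.foldl (fun d p => d.insert p.1 p.2) PySem.Dict.empty

def validate_car_scope_alt (requested_scope : String) (allowed_scopes : String) : Bool :=
  if requested_scope = "" ∨ allowed_scopes = "" then false
  else
    let allowed := PySem.Set.ofList (PySem.Str.split₀ allowed_scopes)
    (PySem.Str.split₀ requested_scope).all
      (fun s => PySem.Set.contains allowed s && scopeToCategory.contains s)

-- ===== PRECONDITION & SPEC =====
def Spec_validate_car_scope (requested_scope : String) (allowed_scopes : String) (out : Bool) : Prop := out = validate_car_scope_alt requested_scope allowed_scopes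
instance (requested_scope : String) (allowed_scopes : String) (out : Bool) : Decidable (Spec_validate_car_scope requested_scope allowed_scopes out) := by unfold Spec_validate_car_scope; infer_instance

-- ===== CLAIM (what is proved, stated in full; the proofs are below) =====
def Claim_equal_validate_car_scope : Prop := ∀ (requested_scope : String) (allowed_scopes : String), Dom_validate_car_scope requested_scope allowed_scopes → Spec_validate_car_scope requested_scope allowed_scopes (validate_car_scope requested_scope allowed_scopes)

-- ===== LEMMAS AND PROOFS =====

-- the reverse dict IS the flat association list (the 55 scope keys are pairwise distinct)
set_option maxRecDepth 40000 in
lemma scopeToCategory_eq_mk : scopeToCategory = PySem.Dict.mk scopePairs := by decide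

-- first-match lookup in the flattened pairs = A's category scan
lemma getMk_flat (l : List (String × List String)) (s : String) :
    (PySem.Dict.mk (l.flatMap (fun p => p.2.map (fun scope => (scope, p.1))))).get? s
      = gscLoop l s := by
  induction l with
  | nil => rfl
  | cons hd tl ih =>
      obtain ⟨c, ss⟩ := hd
      simp only [List.flatMap_cons, gscLoop]
      induction ss with
      | nil => simpa using ih
      | cons x xs ihx =>
          simp only [List.map_cons, List.cons_append, PySem.Dict.get?_mk_cons,
            List.contains_cons]
          by_cases h : s = x
          · subst h; simp
          · have hsx : (s == x) = false := beq_eq_false_iff_ne.mpr h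
            have hxs : (x == s) = false := beq_eq_false_iff_ne.mpr (Ne.symm h)
            simp only [hxs, hsx, Bool.false_or, Bool.false_eq_true, if_false]
            simpa using ihx

lemma contains_eq_isSome_gsc (s : String) :
    scopeToCategory.contains s = (get_scope_category s).isSome := by
  rw [PySem.Dict.contains_eq_isSome_get?, scopeToCategory_eq_mk]
  have h := getMk_flat categoriesA s
  simp only [scopePairs, categoriesB]
  rw [h, get_scope_category]

-- ===== VERDICT (by name: the statement is the Claim_ definition above) =====
theorem validate_car_scope_spec : Claim_equal_validate_car_scope := by
  intro r a _
  unfold Spec_validate_car_scope validate_car_scope validate_car_scope_alt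
  by_cases h0 : r = "" ∨ a = ""
  · simp [h0]
  · simp only [h0, if_false]
    by_cases hsub : PySem.Set.issubset (PySem.Set.ofList (PySem.Str.split₀ r))
        (PySem.Set.ofList (PySem.Str.split₀ a)) = true
    · -- all requested scopes are allowed
      have hmem : ∀ s ∈ PySem.Str.split₀ r, s ∈ PySem.Str.split₀ a := by
        intro s hs
        exact (PySem.Set.mem_ofList _ s).mp
          ((PySem.Set.issubset_iff _ _).mp hsub s ((PySem.Set.mem_ofList _ s).mpr hs))
      -- requested categories ⊆ allowed categories holds automatically
      have hcat : PySem.Set.issubset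
          (PySem.Set.ofList ((PySem.Set.ofList (PySem.Str.split₀ r)).map get_scope_category))
          (PySem.Set.ofList ((PySem.Set.ofList (PySem.Str.split₀ a)).map get_scope_category))
          = true := by
        rw [PySem.Set.issubset_iff]
        intro x hx
        rw [PySem.Set.mem_ofList, List.mem_map] at hx
        obtain ⟨s, hs, rfl⟩ := hx
        rw [PySem.Set.mem_ofList, List.mem_map]
        exact ⟨s, (PySem.Set.mem_ofList _ s).mpr (hmem s ((PySem.Set.mem_ofList _ s).mp hs)), rfl⟩
      -- both sides reduce to 'every requested scope has a category'
      cases hnone : PySem.Set.contains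
          (PySem.Set.ofList ((PySem.Set.ofList (PySem.Str.split₀ r)).map get_scope_category))
          none with
      | true =>
          have hx := (PySem.Set.contains_iff _ _).mp hnone
          rw [PySem.Set.mem_ofList, List.mem_map] at hx
          obtain ⟨s, hs, hgs⟩ := hx
          have hall : (PySem.Str.split₀ r).all
              (fun s => PySem.Set.contains (PySem.Set.ofList (PySem.Str.split₀ a)) s &&
                scopeToCategory.contains s) = false := by
            rw [List.all_eq_false]
            refine ⟨s, (PySem.Set.mem_ofList _ s).mp hs, ?_⟩
            simp [contains_eq_isSome_gsc, hgs]
          rw [hall]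
          simp [hsub]
      | false =>
          have hno : ∀ s ∈ PySem.Str.split₀ r, get_scope_category s ≠ none := by
            intro s hsR hgs
            have : PySem.Set.contains
                (PySem.Set.ofList ((PySem.Set.ofList (PySem.Str.split₀ r)).map get_scope_category))
                none = true := by
              rw [PySem.Set.contains_iff, PySem.Set.mem_ofList, List.mem_map]
              exact ⟨s, (PySem.Set.mem_ofList _ s).mpr hsR, hgs⟩
            rw [hnone] at this
            exact Bool.false_ne_true this
          have hall : (PySem.Str.split₀ r).all
              (fun s => PySem.Set.contains (PySem.Set.ofList (PySem.Str.split₀ a)) s &&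
                scopeToCategory.contains s) = true := by
            rw [List.all_eq_true]
            intro s hsR
            have h1 : PySem.Set.contains (PySem.Set.ofList (PySem.Str.split₀ a)) s = true :=
              (PySem.Set.contains_iff _ _).mpr ((PySem.Set.mem_ofList _ s).mpr (hmem s hsR))
            have h2 : scopeToCategory.contains s = true := by
              rw [contains_eq_isSome_gsc, Option.isSome_iff_ne_none]
              exact hno s hsR
            rw [h1, h2]; rfl
          rw [hall]
          simp [hsub, hcat]
    · -- some requested scope is not allowed: both sides are false
      have hx : ∃ s ∈ PySem.Str.split₀ r, s ∉ PySem.Str.split₀ a := by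
        by_contra hc
        push Not at hc
        apply hsub
        rw [PySem.Set.issubset_iff]
        intro x hmx
        exact (PySem.Set.mem_ofList _ x).mpr (hc x ((PySem.Set.mem_ofList _ x).mp hmx))
      obtain ⟨s, hsR, hsAl⟩ := hx
      have hall : (PySem.Str.split₀ r).all
          (fun s => PySem.Set.contains (PySem.Set.ofList (PySem.Str.split₀ a)) s &&
            scopeToCategory.contains s) = false := by
        rw [List.all_eq_false]
        refine ⟨s, hsR, ?_⟩
        intro hc
        rw [Bool.and_eq_true] at hc
        exact hsAl ((PySem.Set.mem_ofList _ s).mp ((PySem.Set.contains_iff _ _).mp hc.1))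
      rw [hall]
      simp [hsub]
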